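-- pv_equiv track=rewrite | github.com/Nghia03092004/nghia03092004.github.io | project_euler_unified/problem_941/solution.py | gen_binary_palindromes
-- ===== SOURCE A (Python) =====
-- def gen_binary_palindromes(max_bits=30):
--     """Generate all binary palindromes with at most max_bits bits, in sorted order."""
--     pals = []
--     for k in range(1, max_bits + 1):
--         if k == 1:
--             pals.append(1)
--             continue
--         half = (k + 1) // 2
--         for first_half in range(1 << (half - 1), 1 << half):
--             bits = bin(first_half)[2:]
--             if k % 2 == 1:
--                 full = bits + bits[-2::-1]
--             else:
--                 full = bits + bits[::-1]
--             val = int(full, 2)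
--             if val < (1 << max_bits):
--                 pals.append(val)
--     return sorted(pals)
-- ===== SOURCE B (Python) =====
-- def _rev(n):
--     r = 0
--     while n:
--         r = 2 * r + n % 2
--         n //= 2
--     return r
--
--
-- def gen_binary_palindromes(max_bits=30):
--     """Generate all binary palindromes with at most max_bits bits, in sorted order."""
--     pals = []
--     h = 1
--     # every binary palindrome is its half h (the top ceil(k/2) bits) mirrored;
--     # enumerate halves once, emitting the odd- and even-length palindrome of each.
--     while 2 * h.bit_length() - 1 <= max_bits:
--         l = h.bit_length()
--         pals.append(h * 2 ** (l - 1) + _rev(h // 2))   # odd length 2l-1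
--         if 2 * l <= max_bits:
--             pals.append(h * 2 ** l + _rev(h))          # even length 2l
--         h += 1
--     return sorted(pals)
-- ===== Notes on version B (the rewrite author's own statement) =====
-- stated objective: alternative
-- what changed: replaces A's nested length-then-half loops with string mirroring, int-parsing, a dead range filter and a special-cased first length by one arithmetic while-loop over half-values h that emits the odd- and even-length palindrome of each h by pure integer bit reversal (no strings, no filter, no special case).
import Mathlib
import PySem

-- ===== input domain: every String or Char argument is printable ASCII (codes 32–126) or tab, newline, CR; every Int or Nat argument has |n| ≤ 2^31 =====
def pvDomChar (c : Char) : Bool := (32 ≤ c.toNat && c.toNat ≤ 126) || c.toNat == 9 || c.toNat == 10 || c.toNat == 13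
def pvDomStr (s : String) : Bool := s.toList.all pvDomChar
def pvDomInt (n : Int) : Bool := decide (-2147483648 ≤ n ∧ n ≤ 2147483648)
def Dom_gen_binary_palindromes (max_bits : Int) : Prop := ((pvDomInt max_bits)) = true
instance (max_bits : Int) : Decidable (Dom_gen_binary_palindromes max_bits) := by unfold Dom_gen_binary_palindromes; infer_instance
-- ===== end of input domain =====

-- B replaces A's nested length/half loops over mirrored bit-strings (plus a dead range
-- filter and a k==1 special case) by one arithmetic while-loop over half-values that
-- emits each half's odd- and even-length palindrome by integer bit reversal (objective:
-- alternative; same cost).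

-- ===== PORT A =====

-- bin(n)[2:] for n ≥ 1 (A only calls it on first_half ≥ 1), ported by hand over List Char: exact there.
def pvBin (n : Nat) : List Char :=
  if n = 0 then [] else pvBin (n / 2) ++ [if n % 2 = 1 then '1' else '0']

-- int(s, 2) for a nonempty string of '0'/'1' digits (the only strings A parses), ported by hand: exact there.
def pvIntOfBin (cs : List Char) : Int :=
  cs.foldl (fun a c => 2 * a + (if c = '1' then 1 else 0)) 0

def gen_binary_palindromes (max_bits : Int) : List Int :=
  let pals : List Int :=
    (PySem.List.pyRange 1 (max_bits + 1) 1).foldl (fun pals k =>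
      if k = 1 then pals ++ [(1 : Int)]
      else
        let half := PySem.Int.floordiv (k + 1) 2
        -- 1 << (half - 1), 1 << half: here k ≥ 2, so half ≥ 1 and the shift amounts are ≥ 0 (.toNat exact)
        (PySem.List.pyRange ((1 : Int) <<< (half - 1).toNat) ((1 : Int) <<< half.toNat) 1).foldl
          (fun pals first_half =>
            let bits := pvBin first_half.toNat     -- first_half ≥ 1, so .toNat is exact
            -- bits[-2::-1] is bits without its last char, reversed; bits[::-1] is reverse
            let full := if PySem.Int.mod k 2 = 1 then bits ++ bits.dropLast.reverse
                        else bits ++ bits.reverse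
            let val := pvIntOfBin full
            -- 1 << max_bits: this line only runs when max_bits ≥ 2, so .toNat is exact
            if val < (1 : Int) <<< max_bits.toNat then pals ++ [val] else pals)
          pals) []
  PySem.List.sorted pals (fun x => x) false

-- ===== PORT B =====

-- _rev from Source B: while n: r = 2*r + n % 2; n //= 2.  n = h or h//2 with h ≥ 1, so n ≥ 0:
-- ported over Nat, exact there (Python's loop is only ever entered with n ≥ 0 here).
def pvRev (n r : Nat) : Nat :=
  if n = 0 then r else pvRev (n / 2) (2 * r + n % 2)

-- the while-loop of Source B; h starts at 1 and only increments, so h is kept as a Nat (exact).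
def pvAltLoop (max_bits : Int) (h : Nat) (pals : List Int) : List Int :=
  if 2 * (PySem.Int.bitLength (h : Int) : Int) - 1 ≤ max_bits then
    let l := PySem.Int.bitLength (h : Int)
    let pals1 := pals ++ [((h * 2 ^ (l - 1) + pvRev (h / 2) 0 : Nat) : Int)]
    let pals2 := if 2 * (l : Int) ≤ max_bits then
                   pals1 ++ [((h * 2 ^ l + pvRev h 0 : Nat) : Int)]
                 else pals1
    pvAltLoop max_bits (h + 1) pals2
  else pals
termination_by 2 ^ (max_bits.toNat + 2) - h
decreasing_by
  rename_i hc
  have h1 : PySem.Int.bitLength (h : Int) ≤ max_bits.toNat + 2 := by omega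
  have h2 : h < 2 ^ PySem.Int.bitLength (h : Int) := by
    have := PySem.Int.lt_two_pow_bitLength (h : Int)
    simpa using this
  have h3 : (2:Nat) ^ PySem.Int.bitLength (h : Int) ≤ 2 ^ (max_bits.toNat + 2) :=
    Nat.pow_le_pow_right (by omega) h1
  omega

def gen_binary_palindromes_alt (max_bits : Int) : List Int :=
  PySem.List.sorted (pvAltLoop max_bits 1 []) (fun x => x) false

-- ===== PRECONDITION & SPEC =====
def Spec_gen_binary_palindromes (max_bits : Int) (out : List Int) : Prop := out = gen_binary_palindromes_alt max_bits
instance (max_bits : Int) (out : List Int) : Decidable (Spec_gen_binary_palindromes max_bits out) := by unfold Spec_gen_binary_palindromes; infer_instance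

-- ===== CLAIM (what is proved, stated in full; the proofs are below) =====
def Claim_equal_gen_binary_palindromes : Prop := ∀ (max_bits : Int), Dom_gen_binary_palindromes max_bits → Spec_gen_binary_palindromes max_bits (gen_binary_palindromes max_bits)

-- ===== LEMMAS AND PROOFS =====

-- shorthand for Python's bit_length on a Nat
def pvBL (h : Nat) : Nat := PySem.Int.bitLength (h : Int)

-- the halves of bit-length ℓ (ℓ ≥ 1): [2^(ℓ-1), 2^ℓ)
def pvHalfR (l : Nat) : List Nat := List.range' (2 ^ (l - 1)) (2 ^ (l - 1))

-- the odd- / even-length palindromes built from half h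
def pvOddPal (h : Nat) : Int := ((h * 2 ^ (pvBL h - 1) + pvRev (h / 2) 0 : Nat) : Int)
def pvEvenPal (h : Nat) : Int := ((h * 2 ^ pvBL h + pvRev h 0 : Nat) : Int)

theorem pvBL_zero : pvBL 0 = 0 := by simp [pvBL]

theorem pvBL_succ (n : Nat) (hn : 0 < n) : pvBL n = pvBL (n / 2) + 1 := by
  simpa [pvBL] using PySem.Int.bitLength_natCast hn

theorem pvBL_lt (n : Nat) : n < 2 ^ pvBL n := by
  have := PySem.Int.lt_two_pow_bitLength (n : Int)
  simpa [pvBL] using this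

theorem pvBL_le (n : Nat) (hn : 0 < n) : 2 ^ (pvBL n - 1) ≤ n := by
  have := PySem.Int.two_pow_bitLength_le (n : Int) (by exact_mod_cast hn.ne')
  simpa [pvBL] using this

theorem pvBL_eq_of_bounds (n l : Nat) (hl : 0 < l) (h1 : 2 ^ (l - 1) ≤ n) (h2 : n < 2 ^ l) :
    pvBL n = l := by
  have hn : 0 < n := lt_of_lt_of_le (Nat.one_le_two_pow) h1
  have ha := pvBL_lt n
  have hb := pvBL_le n hn
  rcases Nat.lt_trichotomy (pvBL n) l with h | h | h
  · exfalso
    have : (2:Nat) ^ pvBL n ≤ 2 ^ (l - 1) := Nat.pow_le_pow_right (by omega) (by omega)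
    omega
  · exact h
  · exfalso
    have : (2:Nat) ^ l ≤ 2 ^ (pvBL n - 1) := Nat.pow_le_pow_right (by omega) (by omega)
    omega

theorem pvBL_le_of_lt (n t : Nat) (h : n < 2 ^ t) : pvBL n ≤ t := by
  by_contra hc
  rcases Nat.eq_zero_or_pos n with h0 | h0
  · rw [h0, pvBL_zero] at hc; omega
  · have hb := pvBL_le n h0
    have : (2:Nat) ^ t ≤ 2 ^ (pvBL n - 1) := Nat.pow_le_pow_right (by omega) (by omega)
    omega

-- === pvBin / pvIntOfBin facts ===

theorem pvBin_len (n : Nat) : (pvBin n).length = pvBL n := by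
  fun_induction pvBin n with
  | case1 => simp [pvBL_zero]
  | case2 n hn ih =>
    rw [pvBL_succ n (by omega)]
    simp [ih]

theorem pvIntOfBin_shift (cs : List Char) (a : Int) :
    cs.foldl (fun a c => 2 * a + (if c = '1' then 1 else 0)) a
      = a * 2 ^ cs.length + pvIntOfBin cs := by
  induction cs generalizing a with
  | nil => simp [pvIntOfBin]
  | cons c cs ih =>
    simp only [List.foldl_cons, List.length_cons, pvIntOfBin]
    rw [ih, ih (2 * 0 + _)]
    ring

theorem pvIntOfBin_cons (c : Char) (cs : List Char) :
    pvIntOfBin (c :: cs) = (if c = '1' then 1 else 0) * 2 ^ cs.length + pvIntOfBin cs := by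
  show List.foldl _ _ (c :: cs) = _
  rw [List.foldl_cons, pvIntOfBin_shift]
  ring

theorem pvIntOfBin_append (xs ys : List Char) :
    pvIntOfBin (xs ++ ys) = pvIntOfBin xs * 2 ^ ys.length + pvIntOfBin ys := by
  show List.foldl _ _ (xs ++ ys) = _
  rw [List.foldl_append, pvIntOfBin_shift]
  rfl

theorem pvIntOfBin_lt (cs : List Char) : pvIntOfBin cs < 2 ^ cs.length := by
  induction cs with
  | nil => simp [pvIntOfBin]
  | cons c cs ih =>
    rw [pvIntOfBin_cons]
    have h2 : (0:Int) < 2 ^ cs.length := by positivity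
    have hd : (if c = '1' then (1:Int) else 0) * 2 ^ cs.length ≤ 2 ^ cs.length := by
      split <;> simp
    simp only [List.length_cons, pow_succ]
    omega

theorem pvIntOfBin_pvBin (n : Nat) : pvIntOfBin (pvBin n) = n := by
  fun_induction pvBin n with
  | case1 => simp [pvIntOfBin]
  | case2 n hn ih =>
    rw [pvIntOfBin_append, ih]
    have h2 : pvIntOfBin [if n % 2 = 1 then '1' else '0'] = (n % 2 : Nat) := by
      rcases Nat.mod_two_eq_zero_or_one n with h | h <;> simp [h, pvIntOfBin]
    rw [h2]
    simp only [List.length_singleton, pow_one]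
    have := Nat.div_add_mod n 2
    push_cast
    omega

theorem pvBin_dropLast (n : Nat) : (pvBin n).dropLast = pvBin (n / 2) := by
  rcases Nat.eq_zero_or_pos n with h | h
  · simp [h, pvBin]
  · rw [pvBin, if_neg (by omega), List.dropLast_concat]

theorem pvRev_spec (n r : Nat) :
    ((pvRev n r : Nat) : Int) = r * 2 ^ pvBL n + pvIntOfBin (pvBin n).reverse := by
  fun_induction pvRev n r with
  | case1 r => simp [pvBL_zero, pvBin, pvIntOfBin]
  | case2 n r hn ih =>
    have hb : pvBin n = pvBin (n / 2) ++ [if n % 2 = 1 then '1' else '0'] := by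
      rw [pvBin, if_neg hn]
    rw [ih, hb, List.reverse_concat, pvIntOfBin_cons]
    rw [List.length_reverse, pvBin_len, pvBL_succ n (by omega)]
    have hbit : (if (if n % 2 = 1 then '1' else '0') = '1' then (1:Int) else 0) = (n % 2 : Nat) := by
      rcases Nat.mod_two_eq_zero_or_one n with h | h <;> simp [h]
    rw [hbit]
    push_cast
    ring

theorem pvRev_zero_eq (n : Nat) : ((pvRev n 0 : Nat) : Int) = pvIntOfBin (pvBin n).reverse := by
  have := pvRev_spec n 0
  simpa using this

-- the two mirrored strings evaluate to the arithmetic palindromes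
theorem pvOdd_val (h : Nat) (hh : 0 < h) :
    pvIntOfBin (pvBin h ++ (pvBin h).dropLast.reverse) = pvOddPal h := by
  rw [pvIntOfBin_append, pvBin_dropLast, pvIntOfBin_pvBin, List.length_reverse, pvBin_len]
  rw [pvOddPal]
  have hd : pvBL (h / 2) = pvBL h - 1 := by rw [pvBL_succ h hh]; omega
  rw [hd, ← pvRev_zero_eq]
  push_cast
  ring

theorem pvEven_val (h : Nat) (_hh : 0 < h) :
    pvIntOfBin (pvBin h ++ (pvBin h).reverse) = pvEvenPal h := by
  rw [pvIntOfBin_append, pvIntOfBin_pvBin, List.length_reverse, pvBin_len]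
  rw [pvEvenPal, ← pvRev_zero_eq]
  push_cast
  ring

theorem pvRev_zero_lt (n : Nat) : pvRev n 0 < 2 ^ pvBL n := by
  have h1 := pvRev_spec n 0
  have h2 := pvIntOfBin_lt (pvBin n).reverse
  rw [List.length_reverse, pvBin_len] at h2
  have : ((pvRev n 0 : Nat) : Int) < 2 ^ pvBL n := by omega
  exact_mod_cast this

theorem pvOddPal_lt (h : Nat) (hh : 0 < h) : pvOddPal h < 2 ^ (2 * pvBL h - 1) := by
  have hl : 0 < pvBL h := by rw [pvBL_succ h hh]; omega
  have h1 : h < 2 ^ pvBL h := pvBL_lt h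
  have h2 : pvRev (h / 2) 0 < 2 ^ (pvBL h - 1) := by
    have := pvRev_zero_lt (h / 2)
    have hd : pvBL (h / 2) = pvBL h - 1 := by rw [pvBL_succ h hh]; omega
    rwa [hd] at this
  have key : h * 2 ^ (pvBL h - 1) + pvRev (h / 2) 0 < 2 ^ (2 * pvBL h - 1) := by
    have e1 : 2 * pvBL h - 1 = pvBL h + (pvBL h - 1) := by omega
    rw [e1, pow_add]
    have s1 : h * 2 ^ (pvBL h - 1) + pvRev (h / 2) 0 < (h + 1) * 2 ^ (pvBL h - 1) := by
      rw [Nat.succ_mul]; omega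
    have s2 : (h + 1) * 2 ^ (pvBL h - 1) ≤ 2 ^ pvBL h * 2 ^ (pvBL h - 1) :=
      Nat.mul_le_mul_right _ (by omega)
    omega
  unfold pvOddPal
  exact_mod_cast key

theorem pvEvenPal_lt (h : Nat) (_hh : 0 < h) : pvEvenPal h < 2 ^ (2 * pvBL h) := by
  have h1 : h < 2 ^ pvBL h := pvBL_lt h
  have h2 : pvRev h 0 < 2 ^ pvBL h := pvRev_zero_lt h
  have key : h * 2 ^ pvBL h + pvRev h 0 < 2 ^ (2 * pvBL h) := by
    have e1 : 2 * pvBL h = pvBL h + pvBL h := by omega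
    rw [e1, pow_add]
    have s1 : h * 2 ^ pvBL h + pvRev h 0 < (h + 1) * 2 ^ pvBL h := by
      rw [Nat.succ_mul]; omega
    have s2 : (h + 1) * 2 ^ pvBL h ≤ 2 ^ pvBL h * 2 ^ pvBL h :=
      Nat.mul_le_mul_right _ (by omega)
    omega
  unfold pvEvenPal
  exact_mod_cast key

-- === generic permutation lemmas ===

theorem pvFlatMap_append_perm {α β : Type} (f g : α → List β) (l : List α) :
    (l.flatMap fun x => f x ++ g x).Perm (l.flatMap f ++ l.flatMap g) := by
  induction l with
  | nil => simp
  | cons x l ih =>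
    simp only [List.flatMap_cons]
    refine (ih.append_left (f x ++ g x)).trans ?_
    simp only [List.append_assoc]
    refine List.Perm.append_left _ ?_
    rw [← List.append_assoc, ← List.append_assoc]
    exact List.perm_append_comm.append_right _

theorem pvFlatMap_congr {α β : Type} (f g : α → List β) (l : List α)
    (h : ∀ x ∈ l, f x = g x) : l.flatMap f = l.flatMap g := by
  induction l with
  | nil => rfl
  | cons x l ih =>
    simp only [List.flatMap_cons]
    rw [h x (by simp), ih (fun y hy => h y (by simp [hy]))]

theorem pvFlatMap_perm_congr {α β : Type} (f g : α → List β) (l : List α)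
    (h : ∀ x ∈ l, (f x).Perm (g x)) : (l.flatMap f).Perm (l.flatMap g) := by
  induction l with
  | nil => simp
  | cons x l ih =>
    simp only [List.flatMap_cons]
    exact (h x (by simp)).append (ih (fun y hy => h y (by simp [hy])))

theorem pvFlatMap_nil {α β : Type} (l : List α) :
    (l.flatMap fun _ => ([] : List β)) = [] := by
  induction l with
  | nil => rfl
  | cons x l ih => simp [ih]

theorem pvFlatMap_map_singleton {α β : Type} (f : α → β) (l : List α) :
    (l.flatMap fun x => [f x]) = l.map f := by
  induction l with
  | nil => rfl
  | cons x l ih => simp only [List.flatMap_cons, ih]; rfl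

-- parity split of [1, M]
theorem pvParitySplit (M : Nat) :
    (List.range' 1 M).Perm
      (((List.range' 1 ((M + 1) / 2)).map fun l => 2 * l - 1)
        ++ ((List.range' 1 (M / 2)).map fun l => 2 * l)) := by
  induction M with
  | zero => simp
  | succ M ih =>
    have hconc : List.range' 1 (M + 1) = List.range' 1 M ++ [1 + M] := by
      simpa using (List.range'_concat (step := 1) (s := 1) (n := M))
    rw [hconc]
    rcases Nat.even_or_odd M with he | ho
    · -- M even: M + 1 joins the odd block
      obtain ⟨t, ht⟩ := he
      have h1 : (M + 1 + 1) / 2 = t + 1 := by omega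
      have h2 : (M + 1) / 2 = t := by omega
      have h3 : M / 2 = t := by omega
      rw [h1, h2]
      rw [h2, h3] at ih
      have hoc : List.range' 1 (t + 1) = List.range' 1 t ++ [1 + t] := by
        simpa using (List.range'_concat (step := 1) (s := 1) (n := t))
      rw [hoc, List.map_append]
      have hsing : (List.map (fun l => 2 * l - 1) [1 + t]) = [1 + M] := by
        simp only [List.map_cons, List.map_nil]
        congr 1
        omega
      rw [hsing]
      refine (ih.append_right [1 + M]).trans ?_
      simp only [List.append_assoc]
      exact List.perm_append_comm.append_left _
    · -- M odd: M + 1 joins the even block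
      obtain ⟨t, ht⟩ := ho
      have h1 : (M + 1 + 1) / 2 = t + 1 := by omega
      have h2 : (M + 1) / 2 = t + 1 := by omega
      have h3 : M / 2 = t := by omega
      rw [h2, h3] at ih
      rw [h1]
      have hoc : List.range' 1 (t + 1) = List.range' 1 t ++ [1 + t] := by
        simpa using (List.range'_concat (step := 1) (s := 1) (n := t))
      have heven : List.range' 1 ((M + 1) / 2) = List.range' 1 t ++ [1 + t] := by
        rw [h2, hoc]
      rw [heven, List.map_append]
      have hsing : (List.map (fun l => 2 * l) [1 + t]) = [1 + M] := by
        simp only [List.map_cons, List.map_nil]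
        congr 1
        omega
      rw [hsing]
      refine (ih.append_right [1 + M]).trans ?_
      simp [List.append_assoc]

theorem pvDyadic (q : Nat) : List.range' 1 (2 ^ q - 1) = (List.range' 1 q).flatMap pvHalfR := by
  induction q with
  | zero => simp
  | succ q ih =>
    have hconc : List.range' 1 (q + 1) = List.range' 1 q ++ [1 + q] := by
      simpa using (List.range'_concat (step := 1) (s := 1) (n := q))
    rw [hconc, List.flatMap_append, ← ih]
    have hp : 0 < (2:Nat) ^ q := Nat.two_pow_pos q
    have hsplit : List.range' 1 (2 ^ q - 1) ++ List.range' (2 ^ q) (2 ^ q)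
        = List.range' 1 (2 ^ (q + 1) - 1) := by
      have h := List.range'_append (s := 1) (m := 2 ^ q - 1) (n := 2 ^ q) (step := 1)
      have h1 : 1 + 1 * (2 ^ q - 1) = 2 ^ q := by omega
      have h2 : 2 ^ q - 1 + 2 ^ q = 2 ^ (q + 1) - 1 := by
        have : (2:Nat) ^ (q + 1) = 2 ^ q + 2 ^ q := by rw [pow_succ]; omega
        omega
      rw [h1, h2] at h
      exact h
    rw [← hsplit]
    congr 1
    simp only [List.flatMap_singleton, pvHalfR]
    have he : 1 + q - 1 = q := by omega
    rw [he]

theorem pvMem_halfR (h l : Nat) (hl : 0 < l) (hm : h ∈ pvHalfR l) :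
    0 < h ∧ pvBL h = l := by
  rw [pvHalfR, List.mem_range'_1] at hm
  have hp : 0 < (2:Nat) ^ (l - 1) := Nat.two_pow_pos _
  have h2 : (2:Nat) ^ (l - 1) * 2 = 2 ^ l := by
    rw [← pow_succ]
    congr 1
    omega
  refine ⟨by omega, pvBL_eq_of_bounds h l hl (by omega) (by omega)⟩

-- === A-side characterisation ===

def pvValA (k fh : Int) : Int :=
  pvIntOfBin (if PySem.Int.mod k 2 = 1
    then pvBin fh.toNat ++ (pvBin fh.toNat).dropLast.reverse
    else pvBin fh.toNat ++ (pvBin fh.toNat).reverse)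

def pvRowA (M : Nat) (k : Int) : List Int :=
  if k = 1 then [(1 : Int)]
  else
    ((PySem.List.pyRange ((1 : Int) <<< ((PySem.Int.floordiv (k + 1) 2) - 1).toNat)
        ((1 : Int) <<< (PySem.Int.floordiv (k + 1) 2).toNat) 1).filter
      (fun fh => decide (pvValA k fh < (1 : Int) <<< M))).map (pvValA k)

theorem pvApre (m : Int) (_hm : 0 ≤ m) :
    gen_binary_palindromes m
      = PySem.List.sorted ((PySem.List.pyRange 1 (m + 1) 1).flatMap (pvRowA m.toNat)) (fun x => x) false := by
  simp only [gen_binary_palindromes]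
  congr 1
  rw [PySem.List.foldl_congr_mem _ _ (fun pals k => pals ++ pvRowA m.toNat k) _ ?step]
  · rw [PySem.List.foldl_append_eq_flatMap]
    simp
  case step =>
    intro pals k _
    by_cases h1 : k = 1
    · simp [h1, pvRowA]
    · rw [if_neg h1]
      have hrow : pvRowA m.toNat k
          = ((PySem.List.pyRange ((1 : Int) <<< ((PySem.Int.floordiv (k + 1) 2) - 1).toNat)
                ((1 : Int) <<< (PySem.Int.floordiv (k + 1) 2).toNat) 1).filter
              (fun fh => decide (pvValA k fh < (1 : Int) <<< m.toNat))).map (pvValA k) := by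
        simp only [pvRowA, if_neg h1]
      show _ = pals ++ pvRowA m.toNat k
      rw [hrow]
      exact PySem.List.foldl_append_ite
        (fun fh => pvValA k fh < (1 : Int) <<< m.toNat) (pvValA k) _ pals

theorem pvPyRange_cast (a n : Nat) :
    PySem.List.pyRange (a : Int) ((a + n : Nat) : Int) 1
      = (List.range' a n).map (fun x => ((x : Nat) : Int)) := by
  rw [PySem.List.pyRange_one, List.range'_eq_map_range, List.map_map]
  have hn : (((a + n : Nat) : Int) - (a : Int)).toNat = n := by omega
  rw [hn]
  apply List.map_congr_left
  intro x _
  simp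

theorem pvShift_eq (t : Nat) : (1 : Int) <<< t = ((2 ^ t : Nat) : Int) := by
  rw [Int.shiftLeft_eq]
  push_cast
  ring

theorem pvOddPal_one : pvOddPal 1 = 1 := by
  have hb1 : pvBL 1 = 1 := by
    rw [pvBL_succ 1 (by omega)]
    norm_num [pvBL_zero]
  have hr0 : pvRev 0 0 = 0 := by
    rw [pvRev]
    simp
  rw [pvOddPal, hb1]
  norm_num [hr0]

theorem pvRowA_odd (M l : Nat) (hl : 0 < l) (hk : 2 * l - 1 ≤ M) :
    pvRowA M ((2 * l - 1 : Nat) : Int) = (pvHalfR l).map pvOddPal := by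
  rcases Nat.eq_or_lt_of_le hl with h1 | h1
  · -- l = 1: the k = 1 special case
    have hl1 : l = 1 := by omega
    subst hl1
    norm_num [pvRowA, pvHalfR]
    rw [pvOddPal_one]
  · -- l ≥ 2
    have hk1 : ((2 * l - 1 : Nat) : Int) ≠ 1 := by
      intro hx
      omega
    rw [pvRowA, if_neg hk1]
    have hhalf : PySem.Int.floordiv (((2 * l - 1 : Nat) : Int) + 1) 2 = (l : Int) := by
      have e1 : (((2 * l - 1 : Nat) : Int) + 1) = ((2 * l : Nat) : Int) := by push_cast; omega
      rw [e1]
      have e2 := PySem.Int.floordiv_natCast (2 * l) 2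
      have e3 : (2 * l) / 2 = l := by omega
      rw [e3] at e2
      exact_mod_cast e2
    rw [hhalf]
    have ht1 : ((l : Int) - 1).toNat = l - 1 := by omega
    have ht2 : (l : Int).toNat = l := by omega
    rw [ht1, ht2, pvShift_eq (l - 1), pvShift_eq l]
    have hsplit : ((2 ^ l : Nat) : Int) = (((2 ^ (l - 1) + 2 ^ (l - 1)) : Nat) : Int) := by
      congr 1
      have : (2:Nat) ^ (l - 1) * 2 = 2 ^ l := by
        rw [← pow_succ]; congr 1; omega
      omega
    rw [hsplit, pvPyRange_cast]
    have hHR : List.range' (2 ^ (l - 1)) (2 ^ (l - 1)) = pvHalfR l := rfl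
    rw [hHR]
    have hmod : PySem.Int.mod ((2 * l - 1 : Nat) : Int) 2 = 1 := by
      have e2 := PySem.Int.mod_natCast (2 * l - 1) 2
      have e3 : (2 * l - 1) % 2 = 1 := by omega
      rw [e3] at e2
      exact_mod_cast e2
    have hval : ∀ h ∈ pvHalfR l, pvValA ((2 * l - 1 : Nat) : Int) ((h : Nat) : Int) = pvOddPal h := by
      intro h hmem
      obtain ⟨hpos, _⟩ := pvMem_halfR h l hl hmem
      rw [pvValA, if_pos hmod]
      simp only [Int.toNat_natCast]
      exact pvOdd_val h hpos
    have hcond : ∀ h ∈ pvHalfR l, pvValA ((2 * l - 1 : Nat) : Int) ((h : Nat) : Int) < (1 : Int) <<< M := by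
      intro h hmem
      obtain ⟨hpos, hbl⟩ := pvMem_halfR h l hl hmem
      rw [hval h hmem, pvShift_eq]
      have hb := pvOddPal_lt h hpos
      rw [hbl] at hb
      have hmono : (2:Int) ^ (2 * l - 1) ≤ (2:Int) ^ M := by
        apply pow_le_pow_right₀ (by omega) hk
      calc pvOddPal h < 2 ^ (2 * l - 1) := hb
        _ ≤ (2:Int) ^ M := hmono
        _ = ((2 ^ M : Nat) : Int) := by push_cast; ring
    have hfilter : ((pvHalfR l).map (fun x => ((x : Nat) : Int))).filter
        (fun fh => decide (pvValA ((2 * l - 1 : Nat) : Int) fh < (1 : Int) <<< M))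
        = (pvHalfR l).map (fun x => ((x : Nat) : Int)) := by
      rw [List.filter_eq_self]
      intro a ha
      obtain ⟨h, hmem, rfl⟩ := List.mem_map.mp ha
      simpa using hcond h hmem
    rw [hfilter, List.map_map]
    apply List.map_congr_left
    intro h hmem
    exact hval h hmem

theorem pvRowA_even (M l : Nat) (hl : 0 < l) (hk : 2 * l ≤ M) :
    pvRowA M ((2 * l : Nat) : Int) = (pvHalfR l).map pvEvenPal := by
  have hk1 : ((2 * l : Nat) : Int) ≠ 1 := by
    intro hx
    omega
  rw [pvRowA, if_neg hk1]
  have hhalf : PySem.Int.floordiv (((2 * l : Nat) : Int) + 1) 2 = (l : Int) := by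
    have e1 : (((2 * l : Nat) : Int) + 1) = ((2 * l + 1 : Nat) : Int) := by push_cast; omega
    rw [e1]
    have e2 := PySem.Int.floordiv_natCast (2 * l + 1) 2
    have e3 : (2 * l + 1) / 2 = l := by omega
    rw [e3] at e2
    exact_mod_cast e2
  rw [hhalf]
  have ht1 : ((l : Int) - 1).toNat = l - 1 := by omega
  have ht2 : (l : Int).toNat = l := by omega
  rw [ht1, ht2, pvShift_eq (l - 1), pvShift_eq l]
  have hsplit : ((2 ^ l : Nat) : Int) = (((2 ^ (l - 1) + 2 ^ (l - 1)) : Nat) : Int) := by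
    congr 1
    have : (2:Nat) ^ (l - 1) * 2 = 2 ^ l := by
      rw [← pow_succ]; congr 1; omega
    omega
  rw [hsplit, pvPyRange_cast]
  have hHR : List.range' (2 ^ (l - 1)) (2 ^ (l - 1)) = pvHalfR l := rfl
  rw [hHR]
  have hmod : ¬ (PySem.Int.mod ((2 * l : Nat) : Int) 2 = 1) := by
    have e2 := PySem.Int.mod_natCast (2 * l) 2
    have e3 : (2 * l) % 2 = 0 := by omega
    rw [e3] at e2
    intro hx
    rw [show ((2:Nat) : Int) = (2 : Int) from by norm_num] at e2
    rw [e2] at hx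
    norm_num at hx
  have hval : ∀ h ∈ pvHalfR l, pvValA ((2 * l : Nat) : Int) ((h : Nat) : Int) = pvEvenPal h := by
    intro h hmem
    obtain ⟨hpos, _⟩ := pvMem_halfR h l hl hmem
    rw [pvValA, if_neg hmod]
    simp only [Int.toNat_natCast]
    exact pvEven_val h hpos
  have hcond : ∀ h ∈ pvHalfR l, pvValA ((2 * l : Nat) : Int) ((h : Nat) : Int) < (1 : Int) <<< M := by
    intro h hmem
    obtain ⟨hpos, hbl⟩ := pvMem_halfR h l hl hmem
    rw [hval h hmem, pvShift_eq]
    have hb := pvEvenPal_lt h hpos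
    rw [hbl] at hb
    have hmono : (2:Int) ^ (2 * l) ≤ (2:Int) ^ M := by
      apply pow_le_pow_right₀ (by omega) hk
    calc pvEvenPal h < 2 ^ (2 * l) := hb
      _ ≤ (2:Int) ^ M := hmono
      _ = ((2 ^ M : Nat) : Int) := by push_cast; ring
  have hfilter : ((pvHalfR l).map (fun x => ((x : Nat) : Int))).filter
      (fun fh => decide (pvValA ((2 * l : Nat) : Int) fh < (1 : Int) <<< M))
      = (pvHalfR l).map (fun x => ((x : Nat) : Int)) := by
    rw [List.filter_eq_self]
    intro a ha
    obtain ⟨h, hmem, rfl⟩ := List.mem_map.mp ha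
    simpa using hcond h hmem
  rw [hfilter, List.map_map]
  apply List.map_congr_left
  intro h hmem
  exact hval h hmem

-- === B-side characterisation ===

def pvRowB (M : Nat) (h : Nat) : List Int :=
  [pvOddPal h] ++ (if 2 * pvBL h ≤ M then [pvEvenPal h] else [])

theorem pvAltLoop_stop (m : Int) (h : Nat) (pals : List Int)
    (hc : ¬ (2 * (PySem.Int.bitLength (h : Int) : Int) - 1 ≤ m)) :
    pvAltLoop m h pals = pals := by
  rw [pvAltLoop]
  rw [if_neg hc]

theorem pvAltLoop_go (m : Int) (h : Nat) (pals : List Int)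
    (hc : 2 * (PySem.Int.bitLength (h : Int) : Int) - 1 ≤ m) :
    pvAltLoop m h pals
      = pvAltLoop m (h + 1)
          ((pals ++ [((h * 2 ^ (PySem.Int.bitLength (h : Int) - 1) + pvRev (h / 2) 0 : Nat) : Int)])
            ++ (if 2 * (PySem.Int.bitLength (h : Int) : Int) ≤ m then
                  [((h * 2 ^ PySem.Int.bitLength (h : Int) + pvRev h 0 : Nat) : Int)] else [])) := by
  conv_lhs => rw [pvAltLoop]
  rw [if_pos hc]
  by_cases hg : 2 * (PySem.Int.bitLength (h : Int) : Int) ≤ m <;> simp [hg]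

theorem pvAltLoop_acc (m : Int) (h : Nat) (pals : List Int) :
    pvAltLoop m h pals = pals ++ pvAltLoop m h [] := by
  have main : ∀ (fuel h : Nat) (pals : List Int), 2 ^ (m.toNat + 2) - h ≤ fuel →
      pvAltLoop m h pals = pals ++ pvAltLoop m h [] := by
    intro fuel
    induction fuel with
    | zero =>
      intro h pals hf
      have hcond : ¬ (2 * (PySem.Int.bitLength (h : Int) : Int) - 1 ≤ m) := by
        intro hc
        have h2 : h < 2 ^ PySem.Int.bitLength (h : Int) := by
          simpa using PySem.Int.lt_two_pow_bitLength (h : Int)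
        have h1 : PySem.Int.bitLength (h : Int) ≤ m.toNat + 2 := by omega
        have h3 : (2:Nat) ^ PySem.Int.bitLength (h : Int) ≤ 2 ^ (m.toNat + 2) :=
          Nat.pow_le_pow_right (by omega) h1
        omega
      rw [pvAltLoop_stop m h pals hcond, pvAltLoop_stop m h [] hcond]
      simp
    | succ fuel ih =>
      intro h pals hf
      by_cases hcond : 2 * (PySem.Int.bitLength (h : Int) : Int) - 1 ≤ m
      · have h2 : h < 2 ^ PySem.Int.bitLength (h : Int) := by
          simpa using PySem.Int.lt_two_pow_bitLength (h : Int)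
        have h1 : PySem.Int.bitLength (h : Int) ≤ m.toNat + 2 := by omega
        have h3 : (2:Nat) ^ PySem.Int.bitLength (h : Int) ≤ 2 ^ (m.toNat + 2) :=
          Nat.pow_le_pow_right (by omega) h1
        have hfuel : 2 ^ (m.toNat + 2) - (h + 1) ≤ fuel := by omega
        rw [pvAltLoop_go m h pals hcond, pvAltLoop_go m h [] hcond]
        rw [ih (h + 1) _ hfuel]
        conv_rhs => rw [ih (h + 1) _ hfuel]
        simp
      · rw [pvAltLoop_stop m h pals hcond, pvAltLoop_stop m h [] hcond]
        simp
  exact main _ h pals (le_refl _)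

theorem pvAltLoop_eq (m : Int) (hm : 1 ≤ m) : ∀ (n h : Nat),
    ¬ (2 * (PySem.Int.bitLength ((h + n : Nat) : Int) : Int) - 1 ≤ m) →
    (∀ i < n, 2 * (PySem.Int.bitLength ((h + i : Nat) : Int) : Int) - 1 ≤ m) →
    pvAltLoop m h [] = (List.range' h n).flatMap (pvRowB m.toNat) := by
  intro n
  induction n with
  | zero =>
    intro h hstop _
    rw [pvAltLoop, if_neg (by simpa using hstop)]
    simp
  | succ n ih =>
    intro h hstop hgo
    have hc : 2 * (PySem.Int.bitLength ((h : Nat) : Int) : Int) - 1 ≤ m := by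
      have := hgo 0 (by omega)
      simpa using this
    rw [pvAltLoop_go m h [] hc]
    rw [pvAltLoop_acc]
    have ih' : pvAltLoop m (h + 1) [] = (List.range' (h + 1) n).flatMap (pvRowB m.toNat) := by
      apply ih
      · have hh : h + 1 + n = h + (n + 1) := by omega
        rw [hh]; exact hstop
      · intro i hi
        have hh : h + 1 + i = h + (i + 1) := by omega
        rw [hh]; exact hgo (i + 1) (by omega)
    rw [ih']
    have hrange : List.range' h (n + 1) = h :: List.range' (h + 1) n := by
      simp [List.range'_succ]
    rw [hrange, List.flatMap_cons]
    have hrow : pvRowB m.toNat h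
        = [((h * 2 ^ (PySem.Int.bitLength (h : Int) - 1) + pvRev (h / 2) 0 : Nat) : Int)]
          ++ (if 2 * (PySem.Int.bitLength (h : Int) : Int) ≤ m then
                [((h * 2 ^ PySem.Int.bitLength (h : Int) + pvRev h 0 : Nat) : Int)] else []) := by
      by_cases hg : 2 * (PySem.Int.bitLength (h : Int) : Int) ≤ m
      · have hg' : 2 * PySem.Int.bitLength (h : Int) ≤ m.toNat := by omega
        simp [pvRowB, pvOddPal, pvEvenPal, pvBL, hg, hg']
      · have hg' : ¬ (2 * PySem.Int.bitLength (h : Int) ≤ m.toNat) := by omega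
        simp [pvRowB, pvOddPal, pvEvenPal, pvBL, hg, hg']
    rw [hrow]
    simp [List.append_assoc]

-- === the main permutation ===

theorem pvMain (m : Int) (hm : 1 ≤ m) :
    ((PySem.List.pyRange 1 (m + 1) 1).flatMap (pvRowA m.toNat)).Perm (pvAltLoop m 1 []) := by
  have hM1 : 1 ≤ m.toNat := by omega
  -- abbreviations
  set M := m.toNat with hMdef
  -- A side: index list as Nat range
  have hAidx : PySem.List.pyRange 1 (m + 1) 1 = (List.range' 1 M).map (fun x => ((x : Nat) : Int)) := by
    have h := pvPyRange_cast 1 M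
    have he : ((1 + M : Nat) : Int) = m + 1 := by omega
    have he1 : ((1 : Nat) : Int) = (1 : Int) := by norm_num
    rw [he, he1] at h
    exact h
  rw [hAidx, List.flatMap_map]
  refine (List.Perm.flatMap_right _ (pvParitySplit M)).trans ?_
  rw [List.flatMap_append, List.flatMap_map, List.flatMap_map]
  have hodd : List.flatMap (fun a => pvRowA M ((2 * a - 1 : Nat) : Int)) (List.range' 1 ((M + 1) / 2))
      = List.flatMap (fun l => (pvHalfR l).map pvOddPal) (List.range' 1 ((M + 1) / 2)) := by
    apply pvFlatMap_congr
    intro l hl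
    rw [List.mem_range'_1] at hl
    exact pvRowA_odd M l (by omega) (by omega)
  have heven : List.flatMap (fun a => pvRowA M ((2 * a : Nat) : Int)) (List.range' 1 (M / 2))
      = List.flatMap (fun l => (pvHalfR l).map pvEvenPal) (List.range' 1 (M / 2)) := by
    apply pvFlatMap_congr
    intro l hl
    rw [List.mem_range'_1] at hl
    exact pvRowA_even M l (by omega) (by omega)
  rw [hodd, heven]
  -- B side: the while loop is the flatMap of pvRowB over [1, 2^q)
  have hB : pvAltLoop m 1 [] = (List.range' 1 (2 ^ ((M + 1) / 2) - 1)).flatMap (pvRowB M) := by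
    have hpow : 0 < (2:Nat) ^ ((M + 1) / 2) := Nat.two_pow_pos ((M + 1) / 2)
    apply pvAltLoop_eq m hm (2 ^ ((M + 1) / 2) - 1) 1
    · have he : 1 + (2 ^ ((M + 1) / 2) - 1) = 2 ^ ((M + 1) / 2) := by omega
      rw [he]
      have hbl : PySem.Int.bitLength ((2 ^ ((M + 1) / 2) : Nat) : Int) = ((M + 1) / 2) + 1 := by
        refine pvBL_eq_of_bounds (2 ^ ((M + 1) / 2)) (((M + 1) / 2) + 1) (by omega) ?_ ?_
        · simp
        · exact Nat.pow_lt_pow_right (by omega) (by omega)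
      rw [hbl]
      omega
    · intro i hi
      have hlt : 1 + i < 2 ^ ((M + 1) / 2) := by omega
      have hbl : PySem.Int.bitLength ((1 + i : Nat) : Int) ≤ ((M + 1) / 2) :=
        pvBL_le_of_lt (1 + i) ((M + 1) / 2) hlt
      omega
  rw [hB, pvDyadic ((M + 1) / 2), List.flatMap_assoc]
  -- transform the B side into odd/even blocks
  have hstep1 : (List.flatMap (fun x => List.flatMap (pvRowB M) (pvHalfR x)) (List.range' 1 ((M + 1) / 2))).Perm
      (List.flatMap (fun l => (pvHalfR l).map pvOddPal
          ++ (if 2 * l ≤ M then (pvHalfR l).map pvEvenPal else [])) (List.range' 1 ((M + 1) / 2))) := by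
    apply pvFlatMap_perm_congr
    intro l hl
    rw [List.mem_range'_1] at hl
    have hrow : List.flatMap (pvRowB M) (pvHalfR l)
        = List.flatMap (fun h => [pvOddPal h] ++ (if 2 * l ≤ M then [pvEvenPal h] else [])) (pvHalfR l) := by
      apply pvFlatMap_congr
      intro h hmem
      obtain ⟨_, hbl⟩ := pvMem_halfR h l (by omega) hmem
      rw [pvRowB, hbl]
    rw [hrow]
    refine (pvFlatMap_append_perm (fun h => [pvOddPal h])
      (fun h => if 2 * l ≤ M then [pvEvenPal h] else []) (pvHalfR l)).trans ?_
    rw [pvFlatMap_map_singleton]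
    by_cases hg : 2 * l ≤ M
    · simp only [if_pos hg, pvFlatMap_map_singleton]
      exact List.Perm.refl _
    · simp [if_neg hg, pvFlatMap_nil]
  have hstep3 : List.flatMap (fun l => (if 2 * l ≤ M then (pvHalfR l).map pvEvenPal else []))
      (List.range' 1 ((M + 1) / 2)) = List.flatMap (fun l => (pvHalfR l).map pvEvenPal) (List.range' 1 (M / 2)) := by
    have hle : M / 2 ≤ (M + 1) / 2 := by omega
    have hqsplit : List.range' 1 ((M + 1) / 2) = List.range' 1 (M / 2) ++ List.range' (1 + M / 2) ((M + 1) / 2 - M / 2) := by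
      have h := List.range'_append (s := 1) (m := M / 2) (n := (M + 1) / 2 - M / 2) (step := 1)
      have e1 : 1 + 1 * (M / 2) = 1 + M / 2 := by omega
      have e2 : M / 2 + ((M + 1) / 2 - M / 2) = (M + 1) / 2 := by omega
      rw [e1, e2] at h
      exact h.symm
    rw [hqsplit, List.flatMap_append]
    have hfirst : List.flatMap (fun l => (if 2 * l ≤ M then (pvHalfR l).map pvEvenPal else []))
        (List.range' 1 (M / 2)) = List.flatMap (fun l => (pvHalfR l).map pvEvenPal) (List.range' 1 (M / 2)) := by
      apply pvFlatMap_congr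
      intro l hl
      rw [List.mem_range'_1] at hl
      rw [if_pos (by omega)]
    have hsecond : List.flatMap (fun l => (if 2 * l ≤ M then (pvHalfR l).map pvEvenPal else []))
        (List.range' (1 + M / 2) ((M + 1) / 2 - M / 2)) = [] := by
      rw [pvFlatMap_congr _ (fun _ => ([] : List Int)) _ ?_]
      · simp
      · intro l hl
        rw [List.mem_range'_1] at hl
        rw [if_neg (by omega)]
    rw [hfirst, hsecond, List.append_nil]
  refine List.Perm.symm ?_
  refine hstep1.trans ?_
  refine (pvFlatMap_append_perm (fun l => (pvHalfR l).map pvOddPal)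
    (fun l => if 2 * l ≤ M then (pvHalfR l).map pvEvenPal else []) (List.range' 1 ((M + 1) / 2))).trans ?_
  rw [hstep3]

-- ===== VERDICT =====
theorem gen_binary_palindromes_spec : Claim_equal_gen_binary_palindromes := by
  intro m _
  unfold Spec_gen_binary_palindromes
  by_cases hm : 1 ≤ m
  · rw [pvApre m (by omega), gen_binary_palindromes_alt]
    exact (PySem.List.sorted_id_eq_sorted_id_iff_perm _ _).mpr (pvMain m hm)
  · -- max_bits ≤ 0: both loops produce the empty list
    have hA : gen_binary_palindromes m = PySem.List.sorted [] (fun x => x) false := by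
      simp only [gen_binary_palindromes]
      rw [PySem.List.pyRange_one_eq_nil (by omega)]
      rfl
    have hB : gen_binary_palindromes_alt m = PySem.List.sorted [] (fun x => x) false := by
      rw [gen_binary_palindromes_alt]
      rw [pvAltLoop_stop m 1 []]
      have hb1 : PySem.Int.bitLength ((1 : Nat) : Int) = 1 := by decide
      simp only [Nat.cast_one] at hb1 ⊢
      rw [hb1]
      omega
    rw [hA, hB]
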